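-- pv_equiv track=rewrite | github.com/agneum14/aoc2025 | src/d02.py | gold_ids
-- ===== SOURCE A (Python) =====
-- def gold_ids(rng: [int, int]) -> [int]:
--     res = []
--     left, right = rng
--
--     def check_id(digits: [int], p: int) -> bool:
--         if len(digits) % p != 0:
--             return False
--         i = 0
--         j = i + p
--         while j <= len(digits) - p:
--             if digits[i:j] != digits[j:j + p]:
--                 return False
--             i += p
--             j += p
--         return True
--
--     id = left
--     while id <= right:
--         digits = []
--         x = id
--         while x > 0:
--             digits.insert(0, x % 10)
--             x //= 10
--         if any(check_id(digits, p) for p in range(1, len(digits) // 2 + 1)):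
--             res.append(id)
--         id += 1
--
--     return res
-- ===== SOURCE B (Python) =====
-- def gold_ids(rng):
--     left, right = rng
--     if right < 1:
--         return []
--     L = 0
--     x = right
--     while x > 0:
--         L += 1
--         x //= 10
--     res = set()
--     for p in range(1, L // 2 + 1):
--         for k in range(2, L // p + 1):
--             rep = (10 ** (p * k) - 1) // (10 ** p - 1)
--             for b in range(10 ** (p - 1), 10 ** p):
--                 n = b * rep
--                 if left <= n <= right:
--                     res.add(n)
--     return sorted(res)
-- ===== Notes on version B (the rewrite author's own statement) =====
-- stated objective: faster
-- what changed: Instead of scanning every id in [left, right] and testing its digit list for a repeated block (quadratic in digit count per id), B directly enumerates all block-repetition numbers (block b of p digits repeated k>=2 times, i.e. b times the repunit-like factor (10^(pk)-1)/(10^p-1)) up to the number of digits of right, keeps those inside the range in a set, and returns them sorted.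
import Mathlib
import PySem

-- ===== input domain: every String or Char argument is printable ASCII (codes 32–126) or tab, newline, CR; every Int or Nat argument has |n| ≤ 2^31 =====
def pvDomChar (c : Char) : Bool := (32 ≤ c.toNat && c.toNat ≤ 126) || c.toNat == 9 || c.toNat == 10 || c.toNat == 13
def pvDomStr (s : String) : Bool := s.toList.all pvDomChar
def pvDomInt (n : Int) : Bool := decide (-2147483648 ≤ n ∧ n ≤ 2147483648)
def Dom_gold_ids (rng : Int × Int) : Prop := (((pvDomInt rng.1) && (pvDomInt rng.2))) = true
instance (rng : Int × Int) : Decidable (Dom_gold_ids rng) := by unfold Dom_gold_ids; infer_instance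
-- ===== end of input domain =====

-- B enumerates block-repetition numbers directly (per period p, repetition count k and block b)
-- instead of scanning every id in the range and testing its digits; same return value, measurably
-- faster on large ranges.

-- ===== PORT A =====

-- 'while x > 0: digits.insert(0, x % 10); x //= 10'
def digitsLoopA (x : Int) (ds : List Int) : List Int :=
  if _h : 0 < x then
    digitsLoopA (PySem.Int.floordiv x 10) (PySem.Int.mod x 10 :: ds)
  else ds
termination_by x.toNat
decreasing_by
  rw [PySem.Int.floordiv_eq_ediv_of_pos (by omega)]
  omega

-- the 'while j <= len(digits) - p' loop of check_id (fuel = number of remaining iterations,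
-- always sufficient at the call site; it only makes the recursion total)
def checkLoopA (digits : List Int) (p : Int) : Nat → Int → Int → Bool
  | 0, _, _ => true
  | fuel + 1, i, j =>
    if j ≤ (digits.length : Int) - p then
      if PySem.List.slice digits (some i) (some j) = PySem.List.slice digits (some j) (some (j + p)) then
        checkLoopA digits p fuel (i + p) (j + p)
      else false
    else true

def check_idA (digits : List Int) (p : Int) : Bool :=
  if PySem.Int.mod (digits.length : Int) p ≠ 0 then false
  else checkLoopA digits p (digits.length + 1) 0 (0 + p)

def goldLoopA (right : Int) (res : List Int) (id : Int) : List Int :=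
  if _h : id ≤ right then
    goldLoopA right
      (if (PySem.List.pyRange 1 (PySem.Int.floordiv ((digitsLoopA id []).length : Int) 2 + 1) 1).any
          (fun p => check_idA (digitsLoopA id []) p) then res ++ [id] else res)
      (id + 1)
  else res
termination_by (right + 1 - id).toNat
decreasing_by omega

def gold_ids (rng : Int × Int) : List Int := goldLoopA rng.2 [] rng.1

-- ===== PORT B =====

-- 'L = 0; x = right; while x > 0: L += 1; x //= 10'
def numDigitsB (x : Int) (L : Int) : Int :=
  if _h : 0 < x then numDigitsB (PySem.Int.floordiv x 10) (L + 1) else L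
termination_by x.toNat
decreasing_by
  rw [PySem.Int.floordiv_eq_ediv_of_pos (by omega)]
  omega

def gold_ids_alt (rng : Int × Int) : List Int :=
  let left := rng.1
  let right := rng.2
  if right < 1 then []
  else
    let L := numDigitsB right 0
    let res : PySem.Set Int :=
      (PySem.List.pyRange 1 (PySem.Int.floordiv L 2 + 1) 1).foldl (fun res p =>
        (PySem.List.pyRange 2 (PySem.Int.floordiv L p + 1) 1).foldl (fun res k =>
          let rep := PySem.Int.floordiv ((10 : Int) ^ (p * k).toNat - 1) ((10 : Int) ^ p.toNat - 1)
          (PySem.List.pyRange ((10 : Int) ^ (p - 1).toNat) ((10 : Int) ^ p.toNat) 1).foldl (fun res b =>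
            let n := b * rep
            if left ≤ n ∧ n ≤ right then PySem.Set.add res n else res) res) res) PySem.Set.empty
    PySem.List.sorted res (fun x => x) false

-- ===== PRECONDITION & SPEC =====
def Spec_gold_ids (rng : Int × Int) (out : List Int) : Prop := out = gold_ids_alt rng
instance (rng : Int × Int) (out : List Int) : Decidable (Spec_gold_ids rng out) := by unfold Spec_gold_ids; infer_instance

-- ===== CLAIM (what is proved, stated in full; the proofs are below) =====
def Claim_equal_gold_ids : Prop := ∀ (rng : Int × Int), Dom_gold_ids rng → Spec_gold_ids rng (gold_ids rng)

-- ===== LEMMAS AND PROOFS =====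

-- A's per-id test, named for the proofs
def testA (id : Int) : Bool :=
  (PySem.List.pyRange 1 (PySem.Int.floordiv ((digitsLoopA id []).length : Int) 2 + 1) 1).any
    (fun p => check_idA (digitsLoopA id []) p)

-- the geometric 'repunit-like' factor: 1 + 10^p + 10^(2p) + … (k terms)
def SrepN (p k : Nat) : Nat := (Finset.range k).sum (fun i => 10 ^ (p * i))

lemma SrepN_succ (p k : Nat) : SrepN p (k + 1) = 1 + 10 ^ p * SrepN p k := by
  calc SrepN p (k + 1) = (∑ i ∈ Finset.range k, 10 ^ (p * (i + 1))) + 10 ^ (p * 0) := by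
        rw [SrepN, Finset.sum_range_succ']
    _ = (∑ i ∈ Finset.range k, 10 ^ p * 10 ^ (p * i)) + 1 := by
        rw [Nat.mul_zero, pow_zero]
        congr 1
        refine Finset.sum_congr rfl ?_
        intro i _
        rw [show p * (i + 1) = p + p * i by ring, pow_add]
    _ = 1 + 10 ^ p * SrepN p k := by rw [SrepN, Finset.mul_sum]; ring

lemma SrepN_pos (p k : Nat) (hk : 1 ≤ k) : 1 ≤ SrepN p k := by
  obtain ⟨j, rfl⟩ : ∃ j, k = j + 1 := ⟨k - 1, by omega⟩
  rw [SrepN_succ]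
  omega

-- pure form of check_id's loop on the remaining suffix
def allEqB (p : Nat) (s : List Int) : Bool :=
  if _h : 1 ≤ p ∧ 2 * p ≤ s.length then
    (decide (s.take p = (s.drop p).take p)) && allEqB p (s.drop p)
  else true
termination_by s.length
decreasing_by simp; omega

lemma digitsLoopA_eq (x : Int) (ds : List Int) :
    digitsLoopA x ds = ((Nat.digits 10 x.toNat).reverse.map (fun d : Nat => (d : Int))) ++ ds := by
  induction x, ds using digitsLoopA.induct with
  | case1 x ds h ih =>
    rw [digitsLoopA]
    rw [dif_pos h, ih]
    have h10 : PySem.Int.floordiv x 10 = x / 10 := PySem.Int.floordiv_eq_ediv_of_pos (by omega)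
    have hm : PySem.Int.mod x 10 = x % 10 := PySem.Int.mod_eq_emod_of_pos (by omega)
    have ht : (x / 10).toNat = x.toNat / 10 := by omega
    have hd : Nat.digits 10 x.toNat = x.toNat % 10 :: Nat.digits 10 (x.toNat / 10) :=
      Nat.digits_def' (by norm_num) (by omega)
    have hmm : x % 10 = ((x.toNat % 10 : Nat) : Int) := by omega
    rw [h10, hm, ht, hd, hmm]
    simp
  | case2 x ds h =>
    rw [digitsLoopA]
    rw [dif_neg h]
    have : x.toNat = 0 := by omega
    simp [this]

lemma numDigitsB_eq (x L : Int) :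
    numDigitsB x L = L + ((Nat.digits 10 x.toNat).length : Int) := by
  induction x, L using numDigitsB.induct with
  | case1 x L h ih =>
    rw [numDigitsB]
    rw [dif_pos h, ih]
    have h10 : PySem.Int.floordiv x 10 = x / 10 := PySem.Int.floordiv_eq_ediv_of_pos (by omega)
    have ht : (x / 10).toNat = x.toNat / 10 := by omega
    have hd : Nat.digits 10 x.toNat = x.toNat % 10 :: Nat.digits 10 (x.toNat / 10) :=
      Nat.digits_def' (by norm_num) (by omega)
    rw [h10, ht, hd]
    push_cast [List.length_cons]
    ring
  | case2 x L h =>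
    rw [numDigitsB]
    rw [dif_neg h]
    have : x.toNat = 0 := by omega
    simp [this]

lemma goldLoopA_eq (right : Int) (res : List Int) (id : Int) :
    goldLoopA right res id = res ++ (PySem.List.pyRange id (right + 1) 1).filter testA := by
  induction res, id using goldLoopA.induct right with
  | case1 res id h ih =>
    rw [goldLoopA]
    rw [dif_pos h]
    simp only [dite_eq_ite] at ih
    rw [ih]
    rw [show PySem.List.pyRange id (right + 1) 1 = id :: PySem.List.pyRange (id + 1) (right + 1) 1
        from PySem.List.pyRange_one_cons (by omega)]
    rw [List.filter_cons]
    by_cases hc : testA id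
    · rw [if_pos (by simpa [testA] using hc)]
      rw [if_pos (by simpa using hc)]
      simp
    · rw [if_neg (by simpa [testA] using hc)]
      rw [if_neg (by simpa using hc)]
  | case2 res id h =>
    rw [goldLoopA]
    rw [dif_neg h]
    rw [PySem.List.pyRange_one_eq_nil (by omega)]
    simp

lemma checkLoopA_eq_allEqB (digits : List Int) (p : Int) (hp : 1 ≤ p) :
    ∀ (fuel : Nat) (i : Int), 0 ≤ i → (digits.length : Int) ≤ i + fuel →
      checkLoopA digits p fuel i (i + p) = allEqB p.toNat (digits.drop i.toNat) := by
  intro fuel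
  induction fuel with
  | zero =>
    intro i hi hlen
    have hdrop : digits.drop i.toNat = [] := List.drop_eq_nil_of_le (by omega)
    rw [hdrop, checkLoopA, allEqB]
    rw [dif_neg (by simp; omega)]
  | succ fuel ih =>
    intro i hi hlen
    rw [checkLoopA]
    by_cases hc : i + p ≤ (digits.length : Int) - p
    · rw [if_pos hc]
      have hs1 : PySem.List.slice digits (some i) (some (i + p)) =
          (digits.drop i.toNat).take p.toNat := by
        rw [PySem.List.slice_toNat _ hi (by omega)]
        congr 1
        omega
      have hs2 : PySem.List.slice digits (some (i + p)) (some (i + p + p)) =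
          ((digits.drop i.toNat).drop p.toNat).take p.toNat := by
        rw [PySem.List.slice_toNat _ (by omega) (by omega), List.drop_drop]
        congr 1
        · omega
        · congr 1
          omega
      rw [hs1, hs2]
      rw [allEqB]
      rw [dif_pos (show 1 ≤ p.toNat ∧ 2 * p.toNat ≤ (digits.drop i.toNat).length by
        rw [List.length_drop]; omega)]
      by_cases heq : (digits.drop i.toNat).take p.toNat =
          ((digits.drop i.toNat).drop p.toNat).take p.toNat
      · rw [if_pos heq]
        simp only [heq, decide_true, Bool.true_and]
        have hrec := ih (i + p) (by omega) (by omega)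
        rw [hrec, List.drop_drop]
        congr 2
        omega
      · rw [if_neg heq]
        rw [decide_eq_false heq]
        simp
    · rw [if_neg hc]
      rw [allEqB]
      rw [dif_neg (by rw [List.length_drop]; omega)]

lemma allEqB_iff_flatten_aux (p : Nat) (hp : 1 ≤ p) :
    ∀ (K : Nat) (s : List Int), s.length = p * K →
      (allEqB p s = true ↔ s = (List.replicate K (s.take p)).flatten) := by
  intro K
  induction K with
  | zero =>
    intro s hs
    have : s = [] := List.eq_nil_of_length_eq_zero (by omega)
    subst this
    rw [allEqB]
    rw [dif_neg (by simp; omega)]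
    simp
  | succ K ih =>
    intro s hs
    by_cases hK : 1 ≤ K
    · -- at least two blocks
      have hs' : s.length = p * K + p := by rw [hs]; ring
      have hcond : 1 ≤ p ∧ 2 * p ≤ s.length := ⟨hp, by nlinarith⟩
      rw [allEqB, dif_pos hcond]
      have hlen_take : (s.take p).length = p := by
        rw [List.length_take]
        omega
      have hlen_drop : (s.drop p).length = p * K := by
        rw [List.length_drop]
        omega
      have hrec := ih (s.drop p) hlen_drop
      constructor
      · intro hand
        rcases Bool.and_eq_true_iff.mp hand with ⟨hdec, hrest⟩
        have heq : s.take p = (s.drop p).take p := of_decide_eq_true hdec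
        have hdropflat : s.drop p = (List.replicate K (s.take p)).flatten := by
          rw [heq]
          exact hrec.mp hrest
        conv_lhs => rw [← List.take_append_drop p s]
        rw [hdropflat, List.replicate_succ, List.flatten_cons]
      · intro hflat
        set B := s.take p with hB
        have hsplit : s = B ++ (List.replicate K B).flatten := by
          conv_lhs => rw [hflat, List.replicate_succ, List.flatten_cons]
        have hdropeq : s.drop p = (List.replicate K B).flatten := by
          conv_lhs => rw [hsplit]
          rw [← hlen_take, List.drop_left]
        have htakeeq : (s.drop p).take p = B := by
          rw [hdropeq]
          obtain ⟨J, rfl⟩ : ∃ J, K = J + 1 := ⟨K - 1, by omega⟩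
          rw [List.replicate_succ, List.flatten_cons, ← hlen_take, List.take_left]
        rw [decide_eq_true (show B = (s.drop p).take p from htakeeq.symm), Bool.true_and]
        apply hrec.mpr
        rw [htakeeq]
        exact hdropeq
    · -- exactly one block: length = p
      have hK0 : K = 0 := by omega
      subst hK0
      have hslen : s.length = p := by omega
      rw [allEqB, dif_neg (by omega)]
      simp only [true_iff]
      rw [List.take_of_length_le (by omega)]
      simp

lemma allEqB_iff_flatten (p : Nat) (hp : 1 ≤ p) (s : List Int) (hd : p ∣ s.length) :
    allEqB p s = true ↔ s = (List.replicate (s.length / p) (s.take p)).flatten := by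
  obtain ⟨K, hK⟩ := hd
  have : s.length / p = K := by
    rw [hK]
    exact Nat.mul_div_cancel_left K (by omega)
  rw [this]
  exact allEqB_iff_flatten_aux p hp K s hK

lemma ofDigits_flatten_replicate (bl : List Nat) :
    ∀ k : Nat, Nat.ofDigits 10 ((List.replicate k bl).flatten) =
      (Nat.ofDigits 10 bl) * SrepN bl.length k := by
  intro k
  induction k with
  | zero => simp [SrepN]
  | succ k ih =>
    rw [List.replicate_succ, List.flatten_cons, Nat.ofDigits_append, ih, SrepN_succ]
    ring

lemma reverse_flatten_replicate {α : Type} (l : List α) :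
    ∀ k : Nat, ((List.replicate k l).flatten).reverse = (List.replicate k l.reverse).flatten := by
  intro k
  induction k with
  | zero => simp
  | succ k ih =>
    rw [List.replicate_succ, List.flatten_cons, List.reverse_append, ih,
      List.replicate_succ' (n := k), List.flatten_append]
    simp

lemma length_digits_of_bounds (p b : Nat) (hp : 1 ≤ p) (h1 : 10 ^ (p - 1) ≤ b) (h2 : b < 10 ^ p) :
    (Nat.digits 10 b).length = p := by
  have hb0 : b ≠ 0 := by
    have : 0 < 10 ^ (p - 1) := pow_pos (by norm_num) _
    omega
  rw [Nat.length_digits 10 b (by norm_num) hb0]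
  have hlog : Nat.log 10 b = p - 1 :=
    Nat.log_eq_of_pow_le_of_lt_pow h1 (by rwa [Nat.sub_add_cancel hp])
  omega

lemma getLast_flatten_replicate {α : Type} (k : Nat) (hk : 1 ≤ k) (l : List α) (hl : l ≠ [])
    (h : (List.replicate k l).flatten ≠ []) :
    (List.replicate k l).flatten.getLast h = l.getLast hl := by
  obtain ⟨j, rfl⟩ : ∃ j, k = j + 1 := ⟨k - 1, by omega⟩
  have hrw : (List.replicate (j + 1) l).flatten = (List.replicate j l).flatten ++ l := by
    rw [List.replicate_succ', List.flatten_append]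
    simp
  rw [List.getLast_congr _ _ hrw]
  exact List.getLast_append_right ..

lemma digits_repeat (p k b : Nat) (hp : 1 ≤ p) (hk : 1 ≤ k)
    (h1 : 10 ^ (p - 1) ≤ b) (h2 : b < 10 ^ p) :
    Nat.digits 10 (b * SrepN p k) = (List.replicate k (Nat.digits 10 b)).flatten := by
  have hlen := length_digits_of_bounds p b hp h1 h2
  have hb0 : b ≠ 0 := by
    have : 0 < 10 ^ (p - 1) := pow_pos (by norm_num) _
    omega
  have hdne : Nat.digits 10 b ≠ [] := Nat.digits_ne_nil_iff_ne_zero.mpr hb0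
  have hof : Nat.ofDigits 10 ((List.replicate k (Nat.digits 10 b)).flatten) = b * SrepN p k := by
    rw [ofDigits_flatten_replicate, Nat.ofDigits_digits, hlen]
  rw [← hof]
  apply Nat.digits_ofDigits 10 (by norm_num)
  · intro l hl
    rcases List.mem_flatten.mp hl with ⟨t, ht, hlt⟩
    rw [List.eq_of_mem_replicate ht] at hlt
    exact Nat.digits_lt_base (by norm_num) hlt
  · intro hne
    rw [getLast_flatten_replicate k hk _ hdne]
    exact Nat.getLast_digit_ne_zero 10 hb0

lemma repB_eq (p k : Nat) (hp : 1 ≤ p) :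
    PySem.Int.floordiv ((10 : Int) ^ (p * k) - 1) ((10 : Int) ^ p - 1) = (SrepN p k : Int) := by
  have hpos : (0 : Int) < (10 : Int) ^ p - 1 := by
    have : (10 : Nat) ^ 1 ≤ 10 ^ p := Nat.pow_le_pow_right (by norm_num) hp
    have h2 : ((10 : Nat) ^ p : Int) = (10 : Int) ^ p := by push_cast; ring
    omega
  have hgeom : ((10 : Int) ^ p - 1) * (SrepN p k : Int) = (10 : Int) ^ (p * k) - 1 := by
    have hs : (SrepN p k : Int) = ∑ i ∈ Finset.range k, ((10 : Int) ^ p) ^ i := by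
      rw [SrepN]
      push_cast
      refine Finset.sum_congr rfl ?_
      intro i _
      rw [← pow_mul]
    rw [hs, mul_geom_sum, ← pow_mul]
  rw [PySem.Int.floordiv_eq_ediv_of_pos hpos, ← hgeom]
  exact Int.mul_ediv_cancel_left _ (by omega)

-- generic membership / nodup lemmas for the Set-building folds
lemma mem_foldl_step {α : Type} (step : PySem.Set Int → α → PySem.Set Int) (Q : α → Int → Prop)
    (h : ∀ s x m, m ∈ step s x ↔ m ∈ s ∨ Q x m) :
    ∀ (l : List α) (s0 : PySem.Set Int) (m : Int),
      m ∈ l.foldl step s0 ↔ m ∈ s0 ∨ ∃ x ∈ l, Q x m := by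
  intro l
  induction l with
  | nil => simp
  | cons x t ih =>
    intro s0 m
    rw [List.foldl_cons, ih, h]
    constructor
    · rintro ((hs | hq) | ⟨y, hy, hQ⟩)
      · exact Or.inl hs
      · exact Or.inr ⟨x, List.mem_cons_self, hq⟩
      · exact Or.inr ⟨y, List.mem_cons_of_mem _ hy, hQ⟩
    · rintro (hs | ⟨y, hy, hQ⟩)
      · exact Or.inl (Or.inl hs)
      · rcases List.mem_cons.mp hy with rfl | hy'
        · exact Or.inl (Or.inr hQ)
        · exact Or.inr ⟨y, hy', hQ⟩

lemma nodup_foldl_step {α : Type} (step : PySem.Set Int → α → PySem.Set Int)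
    (h : ∀ s x, s.Nodup → (step s x).Nodup) :
    ∀ (l : List α) (s0 : PySem.Set Int), s0.Nodup → (l.foldl step s0).Nodup := by
  intro l
  induction l with
  | nil => intro s0 hs; simpa using hs
  | cons x t ih =>
    intro s0 hs
    rw [List.foldl_cons]
    exact ih _ (h _ _ hs)


-- the semantic predicate B's generation realises
def BSpec (L : Nat) (m : Int) : Prop :=
  ∃ p k b : Nat, 1 ≤ p ∧ 2 ≤ k ∧ p * k ≤ L ∧ 10 ^ (p - 1) ≤ b ∧ b < 10 ^ p ∧
    m = ((b * SrepN p k : Nat) : Int)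

-- B's fold, unrolled into three membership conditions
def QbB (left right rep b m : Int) : Prop := (left ≤ b * rep ∧ b * rep ≤ right) ∧ m = b * rep

def QkB (left right p k m : Int) : Prop :=
  ∃ b ∈ PySem.List.pyRange ((10 : Int) ^ (p - 1).toNat) ((10 : Int) ^ p.toNat) 1,
    QbB left right (PySem.Int.floordiv ((10 : Int) ^ (p * k).toNat - 1) ((10 : Int) ^ p.toNat - 1)) b m

def QpB (left right L p m : Int) : Prop :=
  ∃ k ∈ PySem.List.pyRange 2 (PySem.Int.floordiv L p + 1) 1, QkB left right p k m

lemma mem_innerB (left right rep lo hi : Int) (s : PySem.Set Int) (m : Int) :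
    m ∈ (PySem.List.pyRange lo hi 1).foldl (fun res b =>
        let n := b * rep
        if left ≤ n ∧ n ≤ right then PySem.Set.add res n else res) s
    ↔ m ∈ s ∨ ∃ b ∈ PySem.List.pyRange lo hi 1, QbB left right rep b m := by
  apply mem_foldl_step
  intro s' b m'
  dsimp only []
  split_ifs with hcond
  · rw [PySem.Set.mem_add]
    unfold QbB
    tauto
  · unfold QbB
    tauto

lemma mem_midB (left right p lo hi : Int) (s : PySem.Set Int) (m : Int) :
    m ∈ (PySem.List.pyRange lo hi 1).foldl (fun res k =>
        let rep := PySem.Int.floordiv ((10 : Int) ^ (p * k).toNat - 1) ((10 : Int) ^ p.toNat - 1)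
        (PySem.List.pyRange ((10 : Int) ^ (p - 1).toNat) ((10 : Int) ^ p.toNat) 1).foldl (fun res b =>
          let n := b * rep
          if left ≤ n ∧ n ≤ right then PySem.Set.add res n else res) res) s
    ↔ m ∈ s ∨ ∃ k ∈ PySem.List.pyRange lo hi 1, QkB left right p k m := by
  apply mem_foldl_step
  intro s' k m'
  exact mem_innerB left right _ _ _ s' m'

lemma mem_setB (left right L m : Int) :
    m ∈ (PySem.List.pyRange 1 (PySem.Int.floordiv L 2 + 1) 1).foldl (fun res p =>
        (PySem.List.pyRange 2 (PySem.Int.floordiv L p + 1) 1).foldl (fun res k =>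
          let rep := PySem.Int.floordiv ((10 : Int) ^ (p * k).toNat - 1) ((10 : Int) ^ p.toNat - 1)
          (PySem.List.pyRange ((10 : Int) ^ (p - 1).toNat) ((10 : Int) ^ p.toNat) 1).foldl (fun res b =>
            let n := b * rep
            if left ≤ n ∧ n ≤ right then PySem.Set.add res n else res) res) res) PySem.Set.empty
    ↔ ∃ p ∈ PySem.List.pyRange 1 (PySem.Int.floordiv L 2 + 1) 1, QpB left right L p m := by
  have h := mem_foldl_step (α := Int)
    (fun res p => (PySem.List.pyRange 2 (PySem.Int.floordiv L p + 1) 1).foldl (fun res k =>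
      let rep := PySem.Int.floordiv ((10 : Int) ^ (p * k).toNat - 1) ((10 : Int) ^ p.toNat - 1)
      (PySem.List.pyRange ((10 : Int) ^ (p - 1).toNat) ((10 : Int) ^ p.toNat) 1).foldl (fun res b =>
        let n := b * rep
        if left ≤ n ∧ n ≤ right then PySem.Set.add res n else res) res) res)
    (QpB left right L)
    (fun s p m' => mem_midB left right p _ _ s m')
    (PySem.List.pyRange 1 (PySem.Int.floordiv L 2 + 1) 1) PySem.Set.empty m
  rw [h]
  simp [PySem.Set.empty]

lemma nodup_setB (left right L : Int) :
    ((PySem.List.pyRange 1 (PySem.Int.floordiv L 2 + 1) 1).foldl (fun res p =>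
        (PySem.List.pyRange 2 (PySem.Int.floordiv L p + 1) 1).foldl (fun res k =>
          let rep := PySem.Int.floordiv ((10 : Int) ^ (p * k).toNat - 1) ((10 : Int) ^ p.toNat - 1)
          (PySem.List.pyRange ((10 : Int) ^ (p - 1).toNat) ((10 : Int) ^ p.toNat) 1).foldl (fun res b =>
            let n := b * rep
            if left ≤ n ∧ n ≤ right then PySem.Set.add res n else res) res) res)
      PySem.Set.empty).Nodup := by
  apply nodup_foldl_step
  · intro s p hs
    apply nodup_foldl_step
    · intro s' k hs'
      apply nodup_foldl_step
      · intro s'' b hs''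
        dsimp only []
        split_ifs with hcond
        · exact PySem.Set.nodup_add _ _ hs''
        · exact hs''
      · exact hs'
    · exact hs
  · exact List.nodup_nil

lemma exB_iff (left right m : Int) (Lnat : Nat) :
    (∃ p ∈ PySem.List.pyRange 1 (PySem.Int.floordiv (Lnat : Int) 2 + 1) 1,
        QpB left right (Lnat : Int) p m)
    ↔ (left ≤ m ∧ m ≤ right ∧ BSpec Lnat m) := by
  simp only [QpB, QkB, QbB, PySem.List.mem_pyRange_one]
  constructor
  · rintro ⟨p, ⟨hp1, _hp2⟩, k, ⟨hk1, hk2⟩, b, ⟨hb1, hb2⟩, ⟨hl, hr⟩, rfl⟩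
    set pn := p.toNat with hpn
    set kn := k.toNat with hkn
    set bn := b.toNat with hbn
    have hpcast : p = (pn : Int) := by omega
    have hkcast : k = (kn : Int) := by omega
    have hpk : (p * k).toNat = pn * kn := by
      rw [hpcast, hkcast, ← Nat.cast_mul, Int.toNat_natCast]
    have hrep : PySem.Int.floordiv ((10 : Int) ^ (p * k).toNat - 1) ((10 : Int) ^ pn - 1)
        = ((SrepN pn kn : Nat) : Int) := by
      rw [hpk]
      exact repB_eq pn kn (by omega)
    rw [hrep] at hl hr ⊢
    have hptn : (p - 1).toNat = pn - 1 := by omega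
    rw [hptn] at hb1
    have hb1' : ((10 : Nat) ^ (pn - 1) : Int) ≤ b := by push_cast; exact hb1
    have hb2' : b < ((10 : Nat) ^ pn : Int) := by push_cast; exact hb2
    have hbcast : b = (bn : Int) := by
      have : (0 : Int) ≤ b := le_trans (by positivity) hb1'
      omega
    have hfdp : PySem.Int.floordiv (Lnat : Int) p = ((Lnat / pn : Nat) : Int) := by
      rw [hpcast, PySem.Int.floordiv_natCast]
    rw [hfdp] at hk2
    have hkle : kn ≤ Lnat / pn := by omega
    have hpkL : pn * kn ≤ Lnat := by
      have h2 := (Nat.le_div_iff_mul_le (by omega : 0 < pn)).mp hkle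
      rw [Nat.mul_comm]
      exact h2
    have hbn1 : 10 ^ (pn - 1) ≤ bn := by
      rw [hbcast] at hb1'
      exact_mod_cast hb1'
    have hbn2 : bn < 10 ^ pn := by
      rw [hbcast] at hb2'
      exact_mod_cast hb2'
    exact ⟨hl, hr, pn, kn, bn, by omega, by omega, hpkL, hbn1, hbn2, by rw [hbcast, ← Nat.cast_mul]⟩
  · rintro ⟨hl, hr, pn, kn, bn, hp1, hk1, hpkL, hb1, hb2, rfl⟩
    have hpn0 : 0 < pn := hp1
    have hple : pn ≤ Lnat / 2 := by
      apply (Nat.le_div_iff_mul_le (by omega : 0 < 2)).mpr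
      calc pn * 2 ≤ pn * kn := Nat.mul_le_mul_left pn hk1
        _ ≤ Lnat := hpkL
    have hkle : kn ≤ Lnat / pn := (Nat.le_div_iff_mul_le hpn0).mpr (by rw [Nat.mul_comm]; exact hpkL)
    have hfd2 : PySem.Int.floordiv (Lnat : Int) 2 = ((Lnat / 2 : Nat) : Int) := by
      exact_mod_cast PySem.Int.floordiv_natCast Lnat 2
    have hfdp : PySem.Int.floordiv (Lnat : Int) (pn : Int) = ((Lnat / pn : Nat) : Int) :=
      PySem.Int.floordiv_natCast Lnat pn
    refine ⟨(pn : Int), ⟨by omega, by rw [hfd2]; exact_mod_cast Nat.lt_succ_of_le hple⟩,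
      (kn : Int), ⟨by omega, by rw [hfdp]; exact_mod_cast Nat.lt_succ_of_le hkle⟩,
      (bn : Int), ⟨?_, ?_⟩, ?_⟩
    · have hptn : ((pn : Int) - 1).toNat = pn - 1 := by omega
      rw [hptn]
      exact_mod_cast hb1
    · rw [Int.toNat_natCast]
      exact_mod_cast hb2
    · have hpk : ((pn : Int) * (kn : Int)).toNat = pn * kn := by
        rw [← Nat.cast_mul, Int.toNat_natCast]
      have hrep : PySem.Int.floordiv ((10 : Int) ^ ((pn : Int) * (kn : Int)).toNat - 1)
          ((10 : Int) ^ ((pn : Int)).toNat - 1) = ((SrepN pn kn : Nat) : Int) := by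
        rw [hpk, Int.toNat_natCast]
        exact repB_eq pn kn (by omega)
      rw [hrep, ← Nat.cast_mul]
      exact ⟨⟨hl, hr⟩, rfl⟩

lemma testA_nonpos (m : Int) (hm : m ≤ 0) : testA m = false := by
  unfold testA
  rw [digitsLoopA_eq]
  have h0 : m.toNat = 0 := by omega
  rw [h0]
  decide

lemma testA_iff_BSpec (left right m : Int) (hr : 1 ≤ right) (h1 : left ≤ m) (h2 : m ≤ right) :
    testA m = true ↔ BSpec (Nat.digits 10 right.toNat).length m := by
  by_cases hm : m ≤ 0
  · rw [testA_nonpos m hm]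
    simp only [Bool.false_eq_true, false_iff]
    rintro ⟨p, k, b, hp, hk, hpk, hb1, hb2, heq⟩
    have hbpos : 1 ≤ b := le_trans (Nat.one_le_pow _ _ (by norm_num)) hb1
    have hspos : 1 ≤ SrepN p k := SrepN_pos p k (by omega)
    have hprod : 1 ≤ b * SrepN p k := le_trans (by norm_num) (Nat.mul_le_mul hbpos hspos)
    omega
  · push_neg at hm
    have hm1 : (1 : Int) ≤ m := hm
    set M := m.toNat with hM
    have hM0 : M ≠ 0 := by omega
    set D : List Nat := (Nat.digits 10 M).reverse with hD
    set Lm := D.length with hLm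
    have hdl : digitsLoopA m [] = D.map (fun d : Nat => (d : Int)) := by
      rw [digitsLoopA_eq, List.append_nil]
    have hlenmap : (D.map (fun d : Nat => (d : Int))).length = Lm := by simp [hLm]
    have hfd : PySem.Int.floordiv (Lm : Int) 2 = ((Lm / 2 : Nat) : Int) := by
      exact_mod_cast PySem.Int.floordiv_natCast Lm 2
    have hdig_ne : Nat.digits 10 M ≠ [] := Nat.digits_ne_nil_iff_ne_zero.mpr hM0
    have hinj : Function.Injective (List.map (fun d : Nat => (d : Int))) :=
      List.map_injective_iff.mpr (fun a b h => by exact_mod_cast h)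
    have hmapflat : ∀ (K : Nat) (t : List Nat),
        (List.replicate K (t.map (fun d : Nat => (d : Int)))).flatten
          = (List.replicate K t).flatten.map (fun d : Nat => (d : Int)) := by
      intro K t
      rw [List.map_flatten, List.map_replicate]
    have check_iff : ∀ p : Int, 1 ≤ p →
        (check_idA (D.map (fun d : Nat => (d : Int))) p = true ↔
          (p.toNat ∣ Lm ∧ D = (List.replicate (Lm / p.toNat) (D.take p.toNat)).flatten)) := by
      intro p hp
      unfold check_idA
      rw [hlenmap]
      by_cases hdvd : p.toNat ∣ Lm
      · have hmod : PySem.Int.mod (Lm : Int) p = 0 := by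
          rw [show p = (p.toNat : Int) by omega, PySem.Int.mod_natCast]
          exact_mod_cast Nat.mod_eq_zero_of_dvd hdvd
        rw [if_neg (by simp [hmod])]
        have hloop := checkLoopA_eq_allEqB (D.map (fun d : Nat => (d : Int))) p hp (Lm + 1) 0
          le_rfl (by rw [hlenmap]; push_cast; omega)
        rw [hloop]
        rw [show (0 : Int).toNat = 0 from rfl, List.drop_zero]
        rw [allEqB_iff_flatten p.toNat (by omega) _ (by rw [hlenmap]; exact hdvd)]
        rw [hlenmap, ← List.map_take, hmapflat]
        constructor
        · intro h
          exact ⟨hdvd, hinj h⟩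
        · rintro ⟨_, h⟩
          rw [← h]
      · have hmod : ¬ PySem.Int.mod (Lm : Int) p = 0 := by
          rw [show p = (p.toNat : Int) by omega, PySem.Int.mod_natCast]
          intro hc
          exact hdvd (Nat.dvd_of_mod_eq_zero (by exact_mod_cast hc))
        rw [if_pos (by simpa using hmod)]
        simp only [Bool.false_eq_true, false_iff, not_and]
        intro hdvd'
        exact absurd hdvd' hdvd
    unfold testA
    rw [hdl, hlenmap, hfd, List.any_eq_true]
    constructor
    · rintro ⟨p, hpmem, hchk⟩
      rw [PySem.List.mem_pyRange_one] at hpmem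
      obtain ⟨hp1, hp2⟩ := hpmem
      rw [check_iff p hp1] at hchk
      obtain ⟨hdvd, hflat⟩ := hchk
      set pn := p.toNat with hpn
      have hpn1 : 1 ≤ pn := by omega
      set K := Lm / pn with hK
      have hKLm : pn * K = Lm := Nat.mul_div_cancel' hdvd
      have hp2' : pn ≤ Lm / 2 := by omega
      have h2pn : 2 * pn ≤ Lm := by
        have := (Nat.le_div_iff_mul_le (by norm_num : 0 < 2)).mp hp2'
        omega
      have hK2 : 2 ≤ K := by
        by_contra hlt
        push_neg at hlt
        have : pn * K ≤ pn * 1 := Nat.mul_le_mul_left pn (by omega)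
        omega
      set B0 := D.take pn with hB0
      have hB0len : B0.length = pn := by
        rw [hB0, List.length_take]
        omega
      set bl := B0.reverse with hbl
      have hbllen : bl.length = pn := by rw [hbl, List.length_reverse, hB0len]
      have hDne : D ≠ [] := by
        intro h
        rw [hLm, h] at h2pn
        simp at h2pn
        omega
      have hB0ne : B0 ≠ [] := by
        intro h
        rw [h] at hB0len
        simp at hB0len
        omega
      have hblne : bl ≠ [] := by simp [hbl, hB0ne]
      have hdigM : Nat.digits 10 M = (List.replicate K bl).flatten := by
        have hDrev : Nat.digits 10 M = D.reverse := by rw [hD, List.reverse_reverse]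
        rw [hDrev]
        conv_lhs => rw [hflat]
        rw [reverse_flatten_replicate]
      set b := Nat.ofDigits 10 bl with hbdef
      have hMval : M = b * SrepN pn K := by
        conv_lhs => rw [← Nat.ofDigits_digits 10 M, hdigM]
        rw [ofDigits_flatten_replicate, hbllen]
      have hbllt : ∀ l ∈ bl, l < 10 := by
        intro l hl
        apply Nat.digits_lt_base (by norm_num) (m := M)
        rw [hdigM]
        exact List.mem_flatten.mpr ⟨bl, List.mem_replicate.mpr ⟨by omega, rfl⟩, hl⟩
      have hlast : ∀ h : bl ≠ [], bl.getLast h ≠ 0 := by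
        intro h
        have e1 : bl.getLast h = B0.head hB0ne := List.getLast_reverse _
        have e2 : B0.head hB0ne = D.head hDne := List.head_take _
        have e3 : D.head hDne = (Nat.digits 10 M).getLast hdig_ne := by
          have := List.head_reverse (l := Nat.digits 10 M) (by rw [← hD]; exact hDne)
          calc D.head hDne = (Nat.digits 10 M).reverse.head (by rw [← hD]; exact hDne) := by
                congr 1
            _ = (Nat.digits 10 M).getLast hdig_ne := by rw [this]
        rw [e1, e2, e3]
        exact Nat.getLast_digit_ne_zero 10 hM0
      have hdigb : Nat.digits 10 b = bl := Nat.digits_ofDigits 10 (by norm_num) bl hbllt hlast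
      have hb10 : b < 10 ^ pn := by
        have := Nat.ofDigits_lt_base_pow_length (b := 10) (l := bl) (by norm_num) hbllt
        rwa [hbllen] at this
      have hbne : b ≠ 0 := by
        intro h0
        rw [h0, Nat.digits_zero] at hdigb
        exact hblne hdigb.symm
      have hblow : 10 ^ (pn - 1) ≤ b := by
        have hlog : Nat.log 10 b = pn - 1 := by
          have hl := Nat.length_digits 10 b (by norm_num) hbne
          rw [hdigb, hbllen] at hl
          omega
        calc 10 ^ (pn - 1) = 10 ^ Nat.log 10 b := by rw [hlog]
          _ ≤ b := Nat.pow_log_le_self 10 hbne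
      have hLmL : Lm ≤ (Nat.digits 10 right.toNat).length := by
        have hMR : M ≤ right.toNat := by omega
        have hmono := Nat.le_length_digits_le 10 M right.toNat hMR
        calc Lm = (Nat.digits 10 M).length := by rw [hLm, hD, List.length_reverse]
          _ ≤ _ := hmono
      have hmcast : m = (M : Int) := by omega
      exact ⟨pn, K, b, hpn1, hK2, by omega, hblow, hb10, by rw [hmcast, hMval]⟩
    · rintro ⟨pn, kn, bn, hpn1, hkn2, hpkL, hb1, hb2, heq⟩
      have hMeq : M = bn * SrepN pn kn := by omega
      have hdig0 := digits_repeat pn kn bn hpn1 (by omega) hb1 hb2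
      rw [← hMeq] at hdig0
      have hplen : (Nat.digits 10 bn).length = pn := length_digits_of_bounds pn bn hpn1 hb1 hb2
      set br := (Nat.digits 10 bn).reverse with hbr
      have hbrlen : br.length = pn := by rw [hbr, List.length_reverse, hplen]
      have hDeq : D = (List.replicate kn br).flatten := by
        rw [hD, hdig0, reverse_flatten_replicate]
      have hLmval : Lm = pn * kn := by
        rw [hLm, hDeq]
        simp only [List.length_flatten, List.map_replicate, List.sum_replicate, smul_eq_mul,
          hbrlen]
        ring
      refine ⟨(pn : Int), ?_, ?_⟩
      · rw [PySem.List.mem_pyRange_one]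
        refine ⟨by omega, ?_⟩
        have hple : pn ≤ Lm / 2 := by
          apply (Nat.le_div_iff_mul_le (by norm_num : 0 < 2)).mpr
          calc pn * 2 ≤ pn * kn := Nat.mul_le_mul_left pn hkn2
            _ = Lm := hLmval.symm
        exact_mod_cast Nat.lt_succ_of_le hple
      · rw [check_iff _ (by omega), Int.toNat_natCast]
        refine ⟨⟨kn, hLmval⟩, ?_⟩
        have hKv : Lm / pn = kn := by
          rw [hLmval]
          exact Nat.mul_div_cancel_left kn (by omega)
        rw [hKv]
        have htake : D.take pn = br := by
          rw [hDeq]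
          obtain ⟨J, rfl⟩ : ∃ J, kn = J + 1 := ⟨kn - 1, by omega⟩
          rw [List.replicate_succ, List.flatten_cons, ← hbrlen, List.take_left]
        rw [htake]
        exact hDeq

theorem goldids_equal : ∀ (rng : Int × Int), gold_ids rng = gold_ids_alt rng := by
  rintro ⟨left, right⟩
  show goldLoopA right [] left = gold_ids_alt (left, right)
  rw [goldLoopA_eq, List.nil_append]
  unfold gold_ids_alt
  dsimp only []
  by_cases hrneg : right < 1
  · rw [if_pos hrneg]
    apply List.filter_eq_nil_iff.mpr
    intro a ha
    rw [PySem.List.mem_pyRange_one] at ha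
    simp [testA_nonpos a (by omega)]
  · rw [if_neg hrneg]
    have hr : (1 : Int) ≤ right := by omega
    set Lnat := (Nat.digits 10 right.toNat).length with hLnat
    have hL : numDigitsB right 0 = (Lnat : Int) := by
      rw [numDigitsB_eq]
      omega
    rw [hL]
    symm
    apply PySem.List.sorted_eq_of_perm_of_pairwise_lt
    · have hnodupF : (List.filter testA (PySem.List.pyRange left (right + 1) 1)).Nodup :=
        (PySem.List.nodup_pyRange_one left (right + 1)).filter _
      have hnodupS := nodup_setB left right (Lnat : Int)
      rw [List.perm_ext_iff_of_nodup hnodupF hnodupS]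
      intro a
      rw [List.mem_filter, mem_setB]
      constructor
      · rintro ⟨hmem, htest⟩
        rw [PySem.List.mem_pyRange_one] at hmem
        have hbs := (testA_iff_BSpec left right a hr hmem.1 (by omega)).mp htest
        exact (exB_iff left right a Lnat).mpr ⟨hmem.1, by omega, hbs⟩
      · intro hmem
        obtain ⟨hl, hrr, hbs⟩ := (exB_iff left right a Lnat).mp hmem
        refine ⟨?_, ?_⟩
        · rw [PySem.List.mem_pyRange_one]
          omega
        · exact (testA_iff_BSpec left right a hr hl hrr).mpr hbs
    · exact (PySem.List.pairwise_lt_pyRange_one left (right + 1)).filter _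

-- ===== VERDICT (by name: the statement is the Claim_ definition above) =====
theorem gold_ids_spec : Claim_equal_gold_ids := by
  intro rng _
  unfold Spec_gold_ids
  exact goldids_equal rng
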